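-- pv_equiv track=rewrite | github.com/antman1935/stirling-to-type-b | StirlingPermutations.py | findEndOfBlock
-- ===== SOURCE A (Python) =====
-- def findEndOfBlock(perm, index):
--     elm = perm[index]
--     elms = [elm - 1]
--     index += 1
--     while perm[index] != elm:
--         if perm[index] -1 != elms[-1]:
--             elms.append(perm[index] - 1)
--         index += 1
--     return index, elms
-- ===== SOURCE B (Python) =====
-- def findEndOfBlock(perm, index):
--     elm = perm[index]
--     end = index + 1
--     while perm[end] != elm:
--         end += 1
--     vals = [perm[i] - 1 for i in range(index, end)]
--     return end, [v for p, v in zip([None] + vals, vals) if p != v]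
-- ===== Notes on version B (the rewrite author's own statement) =====
-- stated objective: alternative
-- what changed: A finds the block end and accumulates the deduplicated values in one intertwined scan; B first advances an end pointer to locate the block boundary, then in a separate pass builds the value list for the whole range and collapses consecutive duplicates with a zip-with-previous comprehension.
import Mathlib
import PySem

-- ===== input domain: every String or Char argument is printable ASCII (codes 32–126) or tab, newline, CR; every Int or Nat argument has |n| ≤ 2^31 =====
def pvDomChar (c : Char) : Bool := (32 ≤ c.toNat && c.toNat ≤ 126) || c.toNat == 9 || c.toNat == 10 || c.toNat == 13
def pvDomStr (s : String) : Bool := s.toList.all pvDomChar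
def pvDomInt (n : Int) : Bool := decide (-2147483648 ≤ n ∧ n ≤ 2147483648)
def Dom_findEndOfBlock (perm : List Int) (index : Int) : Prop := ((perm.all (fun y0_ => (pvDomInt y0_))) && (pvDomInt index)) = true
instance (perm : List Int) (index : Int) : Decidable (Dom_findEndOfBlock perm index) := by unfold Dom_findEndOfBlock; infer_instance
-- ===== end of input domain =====

-- B replaces A's single intertwined find-and-accumulate scan by a boundary scan for the block end
-- followed by a separate build-then-collapse pass (objective: alternative decomposition, same cost).

-- ===== PORT A =====
-- the while loop: scan from i until perm[i] == elm, appending perm[i]-1 when it differs from elms[-1];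
-- fuel 2*len+2 exceeds any possible number of iterations (each step i grows; pyGet? none = IndexError → junk (0,[]), outside Pre_)
def pvLoopA (perm : List Int) (elm : Int) : Nat → Int → List Int → Int × List Int
  | 0, _, _ => (0, [])
  | fuel+1, i, elms =>
    match PySem.List.pyGet? perm i with
    | none => (0, [])
    | some v =>
      if v = elm then (i, elms)
      else pvLoopA perm elm fuel (i + 1)
        (if some (v - 1) ≠ PySem.List.pyGet? elms (-1) then elms ++ [v - 1] else elms)

def findEndOfBlock (perm : List Int) (index : Int) : Int × List Int :=
  match PySem.List.pyGet? perm index with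
  | none => (0, [])  -- IndexError, outside Pre_
  | some elm => pvLoopA perm elm (2 * perm.length + 2) (index + 1) [elm - 1]

-- ===== PORT B =====
-- B's while loop: only advance `end` until perm[end] == elm (same fuel remark as for A)
def pvLoopFind (perm : List Int) (elm : Int) : Nat → Int → Option Int
  | 0, _ => none
  | fuel+1, e =>
    match PySem.List.pyGet? perm e with
    | none => none
    | some v => if v = elm then some e else pvLoopFind perm elm fuel (e + 1)

def findEndOfBlock_alt (perm : List Int) (index : Int) : Int × List Int :=
  match PySem.List.pyGet? perm index with
  | none => (0, [])  -- IndexError, outside Pre_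
  | some elm =>
    match pvLoopFind perm elm (2 * perm.length + 2) (index + 1) with
    | none => (0, [])  -- IndexError, outside Pre_
    | some e =>
      -- vals = [perm[i] - 1 for i in range(index, end)]; inside Pre_ every pyGet? here is some, .getD 0 is exact
      let vals := (PySem.List.pyRange index e 1).map (fun i => (PySem.List.pyGet? perm i).getD 0 - 1)
      -- [v for p, v in zip([None] + vals, vals) if p != v]
      (e, (((none : Option Int) :: vals.map some).zip vals).filterMap
            (fun pv => if pv.1 ≠ some pv.2 then some pv.2 else none))

-- ===== PRECONDITION & SPEC =====
-- Pre_ is exactly the set of inputs on which the Python A returns: the initial perm[index] must be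
-- in range (else IndexError), and for 0 ≤ index the element must occur again later (else the scan
-- runs off the end: IndexError); for a negative in-range index the wrapping scan always terminates.
def Pre_findEndOfBlock (perm : List Int) (index : Int) : Prop :=
  -(perm.length : Int) ≤ index ∧ index < perm.length ∧
  (0 ≤ index → ∃ j : Fin perm.length, index < (j : Int) ∧ some (perm.get j) = PySem.List.pyGet? perm index)
instance (perm : List Int) (index : Int) : Decidable (Pre_findEndOfBlock perm index) := by
  unfold Pre_findEndOfBlock; infer_instance

def pvWitness_findEndOfBlock : List Int × Int := ([2, 1, 1, 2], 0)

def Spec_findEndOfBlock (perm : List Int) (index : Int) (out : Int × List Int) : Prop := out = findEndOfBlock_alt perm index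
instance (perm : List Int) (index : Int) (out : Int × List Int) : Decidable (Spec_findEndOfBlock perm index out) := by unfold Spec_findEndOfBlock; infer_instance

-- ===== CLAIM (what is proved, stated in full; the proofs are below) =====
def Claim_equal_findEndOfBlock : Prop := ∀ (perm : List Int) (index : Int), Dom_findEndOfBlock perm index → Pre_findEndOfBlock perm index → Spec_findEndOfBlock perm index (findEndOfBlock perm index)

-- ===== LEMMAS AND PROOFS =====

-- collapse of consecutive duplicates, seeded with the previous value
def pvDedup1 (last : Int) : List Int → List Int
  | [] => []
  | v :: vs => if v = last then pvDedup1 last vs else v :: pvDedup1 v vs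

theorem pvGet_nonneg (xs : List Int) (i : Int) (h1 : 0 ≤ i) (h2 : i < xs.length) :
    ∃ v, PySem.List.pyGet? xs i = some v := by
  simp [PySem.List.pyGet?, PySem.List.pyIdx?, h1, h2]

theorem pvGet_neg (xs : List Int) (i : Int) (h1 : -(xs.length : Int) ≤ i) (h2 : i < 0) :
    PySem.List.pyGet? xs i = PySem.List.pyGet? xs (i + xs.length) := by
  have h3 : ¬ (0 ≤ i) := by omega
  have h4 : 0 ≤ i + xs.length := by omega
  have h5 : i + xs.length < xs.length := by omega
  simp only [PySem.List.pyGet?, PySem.List.pyIdx?, if_neg h3, if_pos h1, if_pos h4, if_pos h5]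
  have : xs.length - (-i).toNat = (i + xs.length).toNat := by omega
  rw [this]

theorem pvGet_ne_none (xs : List Int) (i : Int) (h1 : -(xs.length : Int) ≤ i)
    (h2 : i < xs.length) : PySem.List.pyGet? xs i ≠ none := by
  by_cases h : 0 ≤ i
  · obtain ⟨v, hv⟩ := pvGet_nonneg xs i h h2
    simp [hv]
  · rw [pvGet_neg xs i h1 (by omega)]
    obtain ⟨v, hv⟩ := pvGet_nonneg xs (i + xs.length) (by omega) (by omega)
    simp [hv]

theorem pvLoopFind_le (perm : List Int) (elm : Int) :
    ∀ (fuel : Nat) (i e : Int), pvLoopFind perm elm fuel i = some e → i ≤ e := by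
  intro fuel
  induction fuel with
  | zero => intro i e h; simp [pvLoopFind] at h
  | succ f ih =>
    intro i e h
    rw [pvLoopFind] at h
    cases hg : PySem.List.pyGet? perm i with
    | none => rw [hg] at h; simp at h
    | some v =>
      rw [hg] at h
      by_cases hv : v = elm
      · simp [hv] at h; omega
      · simp [hv] at h; have := ih _ _ h; omega

theorem pvLoopFind_isSome (perm : List Int) (elm : Int) :
    ∀ (fuel : Nat) (i : Int) (k : Nat), k < fuel →
      PySem.List.pyGet? perm (i + k) = some elm →
      (∀ m : Nat, m < k → PySem.List.pyGet? perm (i + m) ≠ none) →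
      (pvLoopFind perm elm fuel i).isSome := by
  intro fuel
  induction fuel with
  | zero => intro i k hk; omega
  | succ f ih =>
    intro i k hk hmatch hm
    rw [pvLoopFind]
    cases hg : PySem.List.pyGet? perm i with
    | none =>
      exfalso
      cases k with
      | zero => simp at hmatch; rw [hmatch] at hg; simp at hg
      | succ k' => exact hm 0 (by omega) (by simpa using hg)
    | some v =>
      by_cases hv : v = elm
      · simp [hv]
      · simp only [if_neg hv]
        cases k with
        | zero => simp at hmatch; rw [hmatch] at hg; simp at hg; exact absurd hg.symm hv
        | succ k' =>
          apply ih (i+1) k' (by omega)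
          · have : i + 1 + (k' : Int) = i + ((k' : Nat) + 1 : Nat) := by push_cast; ring
            rw [this]; exact_mod_cast hmatch
          · intro m hm'
            have : i + 1 + (m : Int) = i + ((m + 1 : Nat) : Int) := by push_cast; ring
            rw [this]; exact hm (m+1) (by omega)

-- A's loop equals: find the end, then append the collapsed values of the scanned range
theorem pvLoopA_eq (perm : List Int) (elm : Int) :
    ∀ (fuel : Nat) (i : Int) (elms : List Int) (last : Int),
      PySem.List.pyGet? elms (-1) = some last →
      pvLoopA perm elm fuel i elms =
        match pvLoopFind perm elm fuel i with
        | none => (0, [])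
        | some e => (e, elms ++ pvDedup1 last
            ((PySem.List.pyRange i e 1).map (fun j => (PySem.List.pyGet? perm j).getD 0 - 1))) := by
  intro fuel
  induction fuel with
  | zero => intro i elms last _; simp [pvLoopA, pvLoopFind]
  | succ f ih =>
    intro i elms last hlast
    rw [pvLoopA, pvLoopFind]
    cases hg : PySem.List.pyGet? perm i with
    | none => simp
    | some v =>
      by_cases hv : v = elm
      · simp only [if_pos hv]
        rw [PySem.List.pyRange_one_eq_nil (le_refl i)]
        simp [pvDedup1]
      · simp only [if_neg hv]
        by_cases hd : v - 1 = last
        · rw [hlast]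
          have hcond : ¬ (some (v - 1) ≠ some last) := by simp [hd]
          rw [if_neg hcond]
          rw [ih (i+1) elms last hlast]
          cases he : pvLoopFind perm elm f (i + 1) with
          | none => simp
          | some e =>
            have hie : i + 1 ≤ e := pvLoopFind_le perm elm f (i+1) e he
            dsimp only
            rw [show PySem.List.pyRange i e 1 = i :: PySem.List.pyRange (i+1) e 1 from
              PySem.List.pyRange_one_cons (by omega)]
            simp [hg, pvDedup1, hd]
        · rw [hlast]
          have hcond : (some (v - 1) ≠ some last) := by simp [hd]
          rw [if_pos hcond]
          rw [ih (i+1) (elms ++ [v-1]) (v-1) (PySem.List.pyGet?_neg_one_append_singleton elms (v-1))]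
          cases he : pvLoopFind perm elm f (i + 1) with
          | none => simp
          | some e =>
            have hie : i + 1 ≤ e := pvLoopFind_le perm elm f (i+1) e he
            dsimp only
            rw [show PySem.List.pyRange i e 1 = i :: PySem.List.pyRange (i+1) e 1 from
              PySem.List.pyRange_one_cons (by omega)]
            simp [hg, pvDedup1, hd]

-- B's zip-with-previous comprehension is the same collapse
theorem pvZipDedup (rest : List Int) :
    ∀ last : Int,
      ((some last :: rest.map some).zip rest).filterMap
          (fun pv : Option Int × Int => if pv.1 = some pv.2 then none else some pv.2)
        = pvDedup1 last rest := by
  induction rest with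
  | nil => intro last; simp [pvDedup1]
  | cons v vs ih =>
    intro last
    simp only [List.map_cons, List.zip_cons_cons, List.filterMap_cons, pvDedup1]
    by_cases h : v = last
    · simp [h, ih]
    · have : some last ≠ some v := by simp [Ne.symm h]
      simp [this, ih, h]

-- ===== VERDICT (by name: the statement is the Claim_ definition above) =====
theorem findEndOfBlock_spec : Claim_equal_findEndOfBlock := by
  intro perm index _ hpre
  obtain ⟨h1, h2, h3⟩ := hpre
  have hlen : 0 < perm.length := by omega
  unfold Spec_findEndOfBlock findEndOfBlock findEndOfBlock_alt
  have helm : ∃ elm, PySem.List.pyGet? perm index = some elm := by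
    by_cases h : 0 ≤ index
    · exact pvGet_nonneg perm index h h2
    · rw [pvGet_neg perm index h1 (by omega)]
      exact pvGet_nonneg perm _ (by omega) (by omega)
  obtain ⟨elm, helm⟩ := helm
  rw [helm]
  dsimp only
  have hsome : (pvLoopFind perm elm (2 * perm.length + 2) (index + 1)).isSome := by
    by_cases hpos : 0 ≤ index
    · obtain ⟨j, hj1, hj2⟩ := h3 hpos
      rw [helm] at hj2
      apply pvLoopFind_isSome perm elm _ (index+1) ((j : Int) - index - 1).toNat (by omega)
      · have hidx : index + 1 + ((((j : Int) - index - 1).toNat : Nat) : Int) = ((j : Nat) : Int) := by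
          omega
        rw [hidx, PySem.List.pyGet?_natCast]
        rw [List.getElem?_eq_getElem j.isLt]
        simpa [List.get_eq_getElem] using hj2
      · intro m hm
        apply pvGet_ne_none
        · omega
        · have : (m : Int) < (j : Int) - index - 1 := by omega
          have hjl : (j : Int) < perm.length := by exact_mod_cast j.isLt
          omega
    · apply pvLoopFind_isSome perm elm _ (index+1) (perm.length - 1) (by omega)
      · have hidx : index + 1 + (((perm.length - 1 : Nat) : Nat) : Int) = index + perm.length := by
          omega
        rw [hidx, ← pvGet_neg perm index h1 (by omega), helm]
      · intro m hm
        apply pvGet_ne_none <;> omega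
  obtain ⟨e, he⟩ := Option.isSome_iff_exists.mp hsome
  rw [pvLoopA_eq perm elm _ (index+1) [elm-1] (elm-1)
    (by simp [PySem.List.pyGet?, PySem.List.pyIdx?]), he]
  have hie : index + 1 ≤ e := pvLoopFind_le perm elm _ (index+1) e he
  dsimp only
  rw [show PySem.List.pyRange index e 1 = index :: PySem.List.pyRange (index+1) e 1 from
    PySem.List.pyRange_one_cons (by omega)]
  simp only [List.map_cons, helm, Option.getD_some, List.zip_cons_cons, List.filterMap_cons,
    ne_eq, ite_not]
  rw [pvZipDedup]
  simp
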